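-- pv_equiv track=rewrite | github.com/JescapsAntwi/ScopeGuard-AI | extractor.py | _fallback_section_extraction
-- ===== SOURCE A (Python) =====
-- from typing import Optional, List, Dict
--
-- def _fallback_section_extraction(text: str) -> Dict[str, str]:
--     """
--     Fallback section extraction using keyword matching.
--
--     Args:
--         text: Cleaned text content
--
--     Returns:
--         Dictionary of section names and their content
--     """
--     sections = {
--         'project_overview': '',
--         'scope': '',
--         'timeline': '',
--         'materials': '',
--         'costs': '',
--         'payment_terms': '',
--         'deliverables': '',
--         'quality_standards': '',
--         'legal_clauses': ''
--     }
--
--     # Split text into paragraphs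
--     paragraphs = text.split('\n\n')
--
--     for paragraph in paragraphs:
--         paragraph_lower = paragraph.lower()
--
--         # Check which section this paragraph belongs to
--         if any(keyword in paragraph_lower for keyword in ['project overview', 'introduction', 'background']):
--             if sections['project_overview']:
--                 sections['project_overview'] += '\n\n' + paragraph
--             else:
--                 sections['project_overview'] = paragraph
--         elif any(keyword in paragraph_lower for keyword in ['scope of work', 'scope', 'work scope']):
--             if sections['scope']:
--                 sections['scope'] += '\n\n' + paragraph
--             else:
--                 sections['scope'] = paragraph
--         elif any(keyword in paragraph_lower for keyword in ['timeline', 'schedule', 'duration', 'deadline']):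
--             if sections['timeline']:
--                 sections['timeline'] += '\n\n' + paragraph
--             else:
--                 sections['timeline'] = paragraph
--         elif any(keyword in paragraph_lower for keyword in ['materials', 'equipment', 'supplies']):
--             if sections['materials']:
--                 sections['materials'] += '\n\n' + paragraph
--             else:
--                 sections['materials'] = paragraph
--         elif any(keyword in paragraph_lower for keyword in ['cost', 'budget', 'pricing', 'estimate']):
--             if sections['costs']:
--                 sections['costs'] += '\n\n' + paragraph
--             else:
--                 sections['costs'] = paragraph
--         elif any(keyword in paragraph_lower for keyword in ['payment', 'invoice', 'billing']):
--             if sections['payment_terms']: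
--                 sections['payment_terms'] += '\n\n' + paragraph
--             else:
--                 sections['payment_terms'] = paragraph
--         elif any(keyword in paragraph_lower for keyword in ['deliverable', 'output', 'result']):
--             if sections['deliverables']:
--                 sections['deliverables'] += '\n\n' + paragraph
--             else:
--                 sections['deliverables'] = paragraph
--         elif any(keyword in paragraph_lower for keyword in ['quality', 'standard', 'specification']):
--             if sections['quality_standards']:
--                 sections['quality_standards'] += '\n\n' + paragraph
--             else:
--                 sections['quality_standards'] = paragraph
--         elif any(keyword in paragraph_lower for keyword in ['legal', 'clause', 'liability', 'warranty']):
--             if sections['legal_clauses']: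
--                 sections['legal_clauses'] += '\n\n' + paragraph
--             else:
--                 sections['legal_clauses'] = paragraph
--
--     return sections
-- ===== SOURCE B (Python) =====
-- from typing import Optional, List, Dict
--
-- _TABLE = [
--     ('project_overview', ['project overview', 'introduction', 'background']),
--     ('scope', ['scope of work', 'scope', 'work scope']),
--     ('timeline', ['timeline', 'schedule', 'duration', 'deadline']),
--     ('materials', ['materials', 'equipment', 'supplies']),
--     ('costs', ['cost', 'budget', 'pricing', 'estimate']),
--     ('payment_terms', ['payment', 'invoice', 'billing']),
--     ('deliverables', ['deliverable', 'output', 'result']),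
--     ('quality_standards', ['quality', 'standard', 'specification']),
--     ('legal_clauses', ['legal', 'clause', 'liability', 'warranty']),
-- ]
--
--
-- def _classify(paragraph_lower: str) -> Optional[str]:
--     for name, keywords in _TABLE:
--         if any(k in paragraph_lower for k in keywords):
--             return name
--     return None
--
--
-- def _fallback_section_extraction(text: str) -> Dict[str, str]:
--     paragraphs = text.split('\n\n')
--     labeled = [(p, _classify(p.lower())) for p in paragraphs]
--     return {name: '\n\n'.join(p for p, n in labeled if n == name)
--             for name, _ in _TABLE}
-- ===== Notes on version B (the rewrite author's own statement) =====
-- stated objective: idiomatic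
-- what changed: Replaces A's nine-branch elif chain that mutates a dict with append-or-set logic by a data-driven design: an ordered (section, keywords) table, a classifier that labels each paragraph once, and a final dict comprehension that joins each section's paragraphs with the blank-line separator.
import Mathlib
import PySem

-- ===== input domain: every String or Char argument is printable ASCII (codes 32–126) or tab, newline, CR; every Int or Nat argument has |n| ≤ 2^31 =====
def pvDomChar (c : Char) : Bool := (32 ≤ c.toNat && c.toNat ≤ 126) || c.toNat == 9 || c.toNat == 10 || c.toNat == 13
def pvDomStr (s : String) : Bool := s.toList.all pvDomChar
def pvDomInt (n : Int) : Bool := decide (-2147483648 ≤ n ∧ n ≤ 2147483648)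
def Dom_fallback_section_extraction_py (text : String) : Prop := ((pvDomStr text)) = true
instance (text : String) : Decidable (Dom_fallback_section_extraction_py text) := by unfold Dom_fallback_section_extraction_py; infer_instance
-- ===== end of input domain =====

-- B replaces A's nine-branch elif chain and append-or-set dict mutation by a keyword table:
-- classify each paragraph once to a section name, then build each section by joining its
-- paragraphs with '\n\n' (objective: idiomatic / table-driven decomposition; same cost).

-- ===== PORT A =====
-- the repeated Python pattern «if sections[key]: sections[key] += '\n\n'+p else: sections[key] = p»
def pvUpdA (d : PySem.Dict String String) (key paragraph : String) : PySem.Dict String String :=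
  if d.getD key "" ≠ "" then d.insert key (d.getD key "" ++ "\n\n" ++ paragraph)
  else d.insert key paragraph

def pvStepA (d : PySem.Dict String String) (paragraph : String) : PySem.Dict String String :=
  let pl := PySem.Str.lower paragraph
  if ["project overview", "introduction", "background"].any (fun k => PySem.Str.isIn k pl) then
    pvUpdA d "project_overview" paragraph
  else if ["scope of work", "scope", "work scope"].any (fun k => PySem.Str.isIn k pl) then
    pvUpdA d "scope" paragraph
  else if ["timeline", "schedule", "duration", "deadline"].any (fun k => PySem.Str.isIn k pl) then
    pvUpdA d "timeline" paragraph
  else if ["materials", "equipment", "supplies"].any (fun k => PySem.Str.isIn k pl) then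
    pvUpdA d "materials" paragraph
  else if ["cost", "budget", "pricing", "estimate"].any (fun k => PySem.Str.isIn k pl) then
    pvUpdA d "costs" paragraph
  else if ["payment", "invoice", "billing"].any (fun k => PySem.Str.isIn k pl) then
    pvUpdA d "payment_terms" paragraph
  else if ["deliverable", "output", "result"].any (fun k => PySem.Str.isIn k pl) then
    pvUpdA d "deliverables" paragraph
  else if ["quality", "standard", "specification"].any (fun k => PySem.Str.isIn k pl) then
    pvUpdA d "quality_standards" paragraph
  else if ["legal", "clause", "liability", "warranty"].any (fun k => PySem.Str.isIn k pl) then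
    pvUpdA d "legal_clauses" paragraph
  else d

def fallback_section_extraction_py (text : String) : List (String × String) :=
  let sections : PySem.Dict String String := PySem.Dict.ofList
    [("project_overview", ""), ("scope", ""), ("timeline", ""), ("materials", ""),
     ("costs", ""), ("payment_terms", ""), ("deliverables", ""), ("quality_standards", ""),
     ("legal_clauses", "")]
  let paragraphs := (PySem.Str.split? text "\n\n").getD []
  (paragraphs.foldl pvStepA sections).items

-- ===== PORT B =====
def pvTable : List (String × List String) :=
  [("project_overview", ["project overview", "introduction", "background"]),
   ("scope", ["scope of work", "scope", "work scope"]),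
   ("timeline", ["timeline", "schedule", "duration", "deadline"]),
   ("materials", ["materials", "equipment", "supplies"]),
   ("costs", ["cost", "budget", "pricing", "estimate"]),
   ("payment_terms", ["payment", "invoice", "billing"]),
   ("deliverables", ["deliverable", "output", "result"]),
   ("quality_standards", ["quality", "standard", "specification"]),
   ("legal_clauses", ["legal", "clause", "liability", "warranty"])]

def pvClassifyGo : List (String × List String) → String → Option String
  | [], _ => none
  | (name, kws) :: rest, pl =>
    if kws.any (fun k => PySem.Str.isIn k pl) then some name else pvClassifyGo rest pl

def pvClassify (pl : String) : Option String := pvClassifyGo pvTable pl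

def fallback_section_extraction_py_alt (text : String) : List (String × String) :=
  let paragraphs := (PySem.Str.split? text "\n\n").getD []
  let labeled := paragraphs.map (fun p => (p, pvClassify (PySem.Str.lower p)))
  pvTable.map (fun e =>
    (e.1, PySem.Str.join "\n\n" ((labeled.filter (fun q => q.2 == some e.1)).map (fun q => q.1))))

-- ===== PRECONDITION & SPEC =====
def Spec_fallback_section_extraction_py (text : String) (out : List (String × String)) : Prop := out = fallback_section_extraction_py_alt text
instance (text : String) (out : List (String × String)) : Decidable (Spec_fallback_section_extraction_py text out) := by unfold Spec_fallback_section_extraction_py; infer_instance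

-- ===== CLAIM (what is proved, stated in full; the proofs are below) =====
def Claim_equal_fallback_section_extraction_py : Prop := ∀ (text : String), Dom_fallback_section_extraction_py text → Spec_fallback_section_extraction_py text (fallback_section_extraction_py text)

-- ===== LEMMAS AND PROOFS =====

-- A's per-branch accumulation on one section value
def pvStepS (s p : String) : String := if s ≠ "" then s ++ "\n\n" ++ p else p

theorem pvUpdA_eq (d : PySem.Dict String String) (k p : String) :
    pvUpdA d k p = d.insert k (pvStepS (d.getD k "") p) := by
  unfold pvUpdA pvStepS; split <;> rfl

theorem pvStepA_classify (d : PySem.Dict String String) (p : String) :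
    pvStepA d p = match pvClassify (PySem.Str.lower p) with
      | some name => pvUpdA d name p
      | none => d := by
  unfold pvStepA pvClassify pvClassifyGo pvTable
  simp only [pvClassifyGo]
  split_ifs <;> rfl

theorem pvClassify_mem {pl n : String} (h : pvClassify pl = some n) :
    n ∈ ["project_overview", "scope", "timeline", "materials", "costs", "payment_terms",
         "deliverables", "quality_standards", "legal_clauses"] := by
  unfold pvClassify pvTable at h
  simp only [pvClassifyGo] at h
  split_ifs at h <;> simp_all

theorem pvClassify_ne_empty {p : String} {n : String}
    (h : pvClassify (PySem.Str.lower p) = some n) : p ≠ "" := by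
  intro hp; subst hp
  simp [show pvClassify (PySem.Str.lower "") = none from rfl] at h

-- the fold invariant: A's dict keeps exactly the nine keys, each value being the
-- pvStepS-fold of the paragraphs classified to that key
theorem pvInvariant (ps : List String) (v1 v2 v3 v4 v5 v6 v7 v8 v9 : String) :
    (ps.foldl pvStepA (PySem.Dict.mk
      [("project_overview", v1), ("scope", v2), ("timeline", v3), ("materials", v4),
       ("costs", v5), ("payment_terms", v6), ("deliverables", v7), ("quality_standards", v8),
       ("legal_clauses", v9)])).items =
    [("project_overview", (ps.filter (fun p => pvClassify (PySem.Str.lower p) == some "project_overview")).foldl pvStepS v1),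
     ("scope", (ps.filter (fun p => pvClassify (PySem.Str.lower p) == some "scope")).foldl pvStepS v2),
     ("timeline", (ps.filter (fun p => pvClassify (PySem.Str.lower p) == some "timeline")).foldl pvStepS v3),
     ("materials", (ps.filter (fun p => pvClassify (PySem.Str.lower p) == some "materials")).foldl pvStepS v4),
     ("costs", (ps.filter (fun p => pvClassify (PySem.Str.lower p) == some "costs")).foldl pvStepS v5),
     ("payment_terms", (ps.filter (fun p => pvClassify (PySem.Str.lower p) == some "payment_terms")).foldl pvStepS v6),
     ("deliverables", (ps.filter (fun p => pvClassify (PySem.Str.lower p) == some "deliverables")).foldl pvStepS v7),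
     ("quality_standards", (ps.filter (fun p => pvClassify (PySem.Str.lower p) == some "quality_standards")).foldl pvStepS v8),
     ("legal_clauses", (ps.filter (fun p => pvClassify (PySem.Str.lower p) == some "legal_clauses")).foldl pvStepS v9)] := by
  induction ps generalizing v1 v2 v3 v4 v5 v6 v7 v8 v9 with
  | nil => rfl
  | cons p ps ih =>
    simp only [List.foldl_cons, List.filter_cons]
    rcases h : pvClassify (PySem.Str.lower p) with _ | name
    · simp only [pvStepA_classify, h]
      exact ih v1 v2 v3 v4 v5 v6 v7 v8 v9
    · have hm := pvClassify_mem h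
      simp only [List.mem_cons, List.not_mem_nil, or_false] at hm
      rcases hm with rfl | rfl | rfl | rfl | rfl | rfl | rfl | rfl | rfl <;>
        · simp only [pvStepA_classify, h, pvUpdA_eq]
          simp
          exact ih _ _ _ _ _ _ _ _ _

-- join vs fold of pvStepS over nonempty strings
theorem pvFoldAux (l : List String) (h : ∀ p ∈ l, p ≠ "") :
    ∀ v, v ≠ "" → l.foldl pvStepS v = PySem.Str.join "\n\n" (v :: l) := by
  induction l with
  | nil =>
    intro v hv
    rw [← String.toList_inj]
    simp [PySem.Str.join, PySem.Chars.join, List.intercalate, List.intersperse]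
  | cons p l ih =>
    intro v hv
    have hvp : v ++ "\n\n" ++ p ≠ "" := by
      intro hc; have := congrArg String.toList hc; simp at this
    rw [List.foldl_cons, show pvStepS v p = v ++ "\n\n" ++ p by simp [pvStepS, hv]]
    rw [ih (fun q hq => h q (by simp [hq])) _ hvp]
    rw [← String.toList_inj]
    cases l with
    | nil => simp [PySem.Str.join, PySem.Chars.join, List.intercalate]
    | cons w l =>
      simp only [PySem.Str.join, PySem.Chars.join, List.intercalate, String.toList_ofList,
        List.map_cons, String.toList_append]
      rw [show ∀ (x y : List Char) (m : List (List Char)),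
            List.intersperse ("\n\n".toList) (x::y::m) = x :: ("\n\n".toList) :: List.intersperse ("\n\n".toList) (y::m) from fun _ _ _ => rfl]
      rw [show ∀ (x y : List Char) (m : List (List Char)),
            List.intersperse ("\n\n".toList) (x::y::m) = x :: ("\n\n".toList) :: List.intersperse ("\n\n".toList) (y::m) from fun _ _ _ => rfl]
      simp

theorem pvFold_join (l : List String) (h : ∀ p ∈ l, p ≠ "") :
    l.foldl pvStepS "" = PySem.Str.join "\n\n" l := by
  cases l with
  | nil => rfl
  | cons p l =>
    rw [List.foldl_cons, show pvStepS "" p = p by simp [pvStepS]]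
    exact pvFoldAux l (fun q hq => h q (by simp [hq])) p (h p (by simp))

theorem pvFilter_fold_join (ps : List String) (n : String) :
    (ps.filter (fun p => pvClassify (PySem.Str.lower p) == some n)).foldl pvStepS "" =
    PySem.Str.join "\n\n" (ps.filter (fun p => pvClassify (PySem.Str.lower p) == some n)) := by
  apply pvFold_join
  intro p hp
  have := (List.mem_filter.mp hp).2
  exact pvClassify_ne_empty (by simpa using this)

-- ===== VERDICT (by name: the statement is the Claim_ definition above) =====
theorem fallback_section_extraction_py_spec : Claim_equal_fallback_section_extraction_py := by
  intro text _
  unfold Spec_fallback_section_extraction_py fallback_section_extraction_py fallback_section_extraction_py_alt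
  rw [show (PySem.Dict.ofList
    [("project_overview", ""), ("scope", ""), ("timeline", ""), ("materials", ""),
     ("costs", ""), ("payment_terms", ""), ("deliverables", ""), ("quality_standards", ""),
     ("legal_clauses", "")] : PySem.Dict String String) = PySem.Dict.mk
    [("project_overview", ""), ("scope", ""), ("timeline", ""), ("materials", ""),
     ("costs", ""), ("payment_terms", ""), ("deliverables", ""), ("quality_standards", ""),
     ("legal_clauses", "")] from rfl]
  rw [pvInvariant]
  simp [pvTable, List.filter_map, Function.comp_def, pvFilter_fold_join]
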